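-- pv_equiv track=rewrite | github.com/adititakale01/Magus-AI | hackathon 2/demo_web_gui/src/sop.py | _infer_show_weights
-- ===== SOURCE A (Python) =====
-- def _infer_show_weights(requirements: list[str]) -> bool:
--     actual = False
--     chargeable = False
--     for text in requirements:
--         s = str(text or "").strip().casefold()
--         if not s:
--             continue
--         if "actual" in s and "weight" in s:
--             actual = True
--         if "chargeable" in s and "weight" in s:
--             chargeable = True
--         if "show" in s and "chargeable" in s and "actual" in s:
--             return True
--     return actual and chargeable
-- ===== SOURCE B (Python) =====
-- def _infer_show_weights(requirements: list[str]) -> bool: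
--     norm = [str(t or "").strip().casefold() for t in requirements]
--     return (
--         any("show" in s and "chargeable" in s and "actual" in s for s in norm)
--         or (any("actual" in s and "weight" in s for s in norm)
--             and any("chargeable" in s and "weight" in s for s in norm))
--     )
-- ===== Notes on version B (the rewrite author's own statement) =====
-- stated objective: idiomatic
-- what changed: Replaces the single early-exiting accumulator loop with one normalization pass followed by three independent any() scans combined in a single boolean expression.
import Mathlib
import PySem

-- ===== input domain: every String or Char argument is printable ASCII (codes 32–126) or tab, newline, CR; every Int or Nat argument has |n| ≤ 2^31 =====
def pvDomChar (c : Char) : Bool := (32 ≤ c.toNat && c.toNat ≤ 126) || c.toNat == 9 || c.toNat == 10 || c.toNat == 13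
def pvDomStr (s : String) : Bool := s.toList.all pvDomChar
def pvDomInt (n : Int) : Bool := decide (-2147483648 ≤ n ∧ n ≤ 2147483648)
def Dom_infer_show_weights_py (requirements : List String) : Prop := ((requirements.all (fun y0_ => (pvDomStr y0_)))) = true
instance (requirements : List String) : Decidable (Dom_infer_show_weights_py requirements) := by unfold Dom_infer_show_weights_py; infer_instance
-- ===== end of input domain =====

-- B replaces A's single early-exiting accumulator loop by a normalization pass plus three
-- independent any-scans combined in one boolean expression (idiomatic; same cost).


-- ===== PORT A =====
-- loop of A with the two accumulator flags; `str(text or "")` is the identity on strings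
-- (empty → "" → same string); `.casefold()` is ported as PySem.Str.lower, exact on the
-- ASCII domain.
def inferShowWeightsLoop : List String → Bool → Bool → Bool
  | [], actual, chargeable => actual && chargeable
  | text :: rest, actual, chargeable =>
    let s := PySem.Str.lower (PySem.Str.strip text)
    if s = "" then
      inferShowWeightsLoop rest actual chargeable
    else
      let actual := if PySem.Str.isIn "actual" s && PySem.Str.isIn "weight" s then true else actual
      let chargeable := if PySem.Str.isIn "chargeable" s && PySem.Str.isIn "weight" s then true else chargeable
      if PySem.Str.isIn "show" s && PySem.Str.isIn "chargeable" s && PySem.Str.isIn "actual" s then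
        true
      else
        inferShowWeightsLoop rest actual chargeable

def infer_show_weights_py (requirements : List String) : Bool :=
  inferShowWeightsLoop requirements false false

-- ===== PORT B =====
-- helpers of Source B: one normalization, three per-string predicates
def pvNorm (t : String) : String := PySem.Str.lower (PySem.Str.strip t)
def pvTriple (s : String) : Bool :=
  PySem.Str.isIn "show" s && PySem.Str.isIn "chargeable" s && PySem.Str.isIn "actual" s
def pvAW (s : String) : Bool := PySem.Str.isIn "actual" s && PySem.Str.isIn "weight" s
def pvCW (s : String) : Bool := PySem.Str.isIn "chargeable" s && PySem.Str.isIn "weight" s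

def infer_show_weights_py_alt (requirements : List String) : Bool :=
  let norm := requirements.map pvNorm
  norm.any pvTriple || (norm.any pvAW && norm.any pvCW)

-- ===== PRECONDITION & SPEC =====
def Spec_infer_show_weights_py (requirements : List String) (out : Bool) : Prop := out = infer_show_weights_py_alt requirements
instance (requirements : List String) (out : Bool) : Decidable (Spec_infer_show_weights_py requirements out) := by unfold Spec_infer_show_weights_py; infer_instance

-- ===== CLAIM (what is proved, stated in full; the proofs are below) =====
def Claim_equal_infer_show_weights_py : Prop := ∀ (requirements : List String), Dom_infer_show_weights_py requirements → Spec_infer_show_weights_py requirements (infer_show_weights_py requirements)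

-- ===== LEMMAS AND PROOFS =====

lemma inferShowWeightsLoop_eq (l : List String) :
    ∀ a c : Bool,
      inferShowWeightsLoop l a c =
        ((l.map pvNorm).any pvTriple ||
          ((a || (l.map pvNorm).any pvAW) && (c || (l.map pvNorm).any pvCW))) := by
  induction l with
  | nil => intro a c; simp [inferShowWeightsLoop]
  | cons t rest ih =>
    intro a c
    simp only [inferShowWeightsLoop, List.map_cons, List.any_cons]
    by_cases h : PySem.Str.lower (PySem.Str.strip t) = ""
    · have h' : pvNorm t = "" := h
      rw [if_pos h, ih, h']
      have ht : pvTriple "" = false := by decide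
      have ha : pvAW "" = false := by decide
      have hc : pvCW "" = false := by decide
      rw [ht, ha, hc]
      simp
    · rw [if_neg h, pvNorm]
      set s := PySem.Str.lower (PySem.Str.strip t) with hs
      show (if pvTriple s then true
            else inferShowWeightsLoop rest (if pvAW s then true else a) (if pvCW s then true else c)) = _
      rw [ih]
      cases hT : pvTriple s <;> cases hA : pvAW s <;> cases hC : pvCW s <;>
        cases a <;> cases c <;> simp

-- ===== VERDICT (by name: the statement is the Claim_ definition above) =====
theorem infer_show_weights_py_spec : Claim_equal_infer_show_weights_py := by
  intro requirements _
  show infer_show_weights_py requirements = infer_show_weights_py_alt requirements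
  rw [infer_show_weights_py, inferShowWeightsLoop_eq, infer_show_weights_py_alt]
  simp
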